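-- pv_equiv track=rewrite | github.com/SachinPandey22/Hacker_Rank_Python_DSA | Unit 2/advs2q5.py | assign_unique_nicknames
-- ===== SOURCE A (Python) =====
-- def assign_unique_nicknames(nicknames):
--     dic_count = {}
--     lst = []
--     for nickname in nicknames:
--         if nickname not in dic_count:
--             lst.append(nickname)
--             dic_count[nickname] = 1
--         else:
--             lst.append(f"{nickname}({dic_count[nickname]})")
--             dic_count[nickname] += 1
--
--     return lst
-- ===== SOURCE B (Python) =====
-- def assign_unique_nicknames(nicknames):
--     # Group-then-scatter: collect each name's occurrence positions, then fill a
--     # preallocated output, labelling the k-th occurrence (k>=1) with "(k)".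
--     positions = {}
--     for i, name in enumerate(nicknames):
--         positions[name] = positions.get(name, []) + [i]
--     out = [""] * len(nicknames)
--     for name, idxs in positions.items():
--         for k, i in enumerate(idxs):
--             out[i] = name if k == 0 else f"{name}({k})"
--     return out
-- ===== Notes on version B (the rewrite author's own statement) =====
-- stated objective: alternative
-- what changed: Replaces the single appending pass with a running count dictionary by a group-then-scatter scheme: first build a map from each name to the list of its occurrence indices, then fill a preallocated output array by writing each name's labelled occurrences at their positions.
import Mathlib
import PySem

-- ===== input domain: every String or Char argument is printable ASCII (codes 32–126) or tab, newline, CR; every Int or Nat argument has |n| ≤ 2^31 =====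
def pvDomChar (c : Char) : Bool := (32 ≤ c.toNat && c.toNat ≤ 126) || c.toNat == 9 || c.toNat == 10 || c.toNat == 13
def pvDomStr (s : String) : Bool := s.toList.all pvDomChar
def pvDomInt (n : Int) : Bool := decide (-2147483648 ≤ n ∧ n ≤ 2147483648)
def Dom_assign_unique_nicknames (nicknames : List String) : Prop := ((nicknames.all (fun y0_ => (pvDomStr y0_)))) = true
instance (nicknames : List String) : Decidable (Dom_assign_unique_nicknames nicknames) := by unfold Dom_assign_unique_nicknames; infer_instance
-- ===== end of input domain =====

-- B groups each name's occurrence positions first and then scatters the labelled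
-- occurrences into a preallocated output (alternative scheme, same results).

-- ===== PORT A =====
def assign_unique_nicknames (nicknames : List String) : List String :=
  (nicknames.foldl
    (fun (st : PySem.Dict String Int × List String) nickname =>
      if st.1.contains nickname = false then
        (st.1.insert nickname 1, st.2 ++ [nickname])
      else
        (st.1.modify nickname 0 (· + 1),
         st.2 ++ [nickname ++ "(" ++ PySem.Int.toStr (st.1.getD nickname 0) ++ ")"]))
    (PySem.Dict.empty, [])).2

-- ===== PORT B =====
-- out[i] = v is List.set at i.toNat: exact here since every written index comes
-- from enumerate(nicknames) and so is a valid non-negative index of out.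
def assign_unique_nicknames_alt (nicknames : List String) : List String :=
  let positions :=
    (PySem.List.enumerate nicknames).foldl
      (fun (d : PySem.Dict String (List Int)) p => d.modify p.2 [] (· ++ [p.1]))
      PySem.Dict.empty
  let out0 := List.replicate nicknames.length ""
  positions.items.foldl
    (fun out q =>
      (PySem.List.enumerate q.2).foldl
        (fun out r =>
          out.set r.2.toNat
            (if r.1 = 0 then q.1 else q.1 ++ "(" ++ PySem.Int.toStr r.1 ++ ")"))
        out)
    out0

-- ===== PRECONDITION & SPEC =====
def Spec_assign_unique_nicknames (nicknames : List String) (out : List String) : Prop := out = assign_unique_nicknames_alt nicknames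
instance (nicknames : List String) (out : List String) : Decidable (Spec_assign_unique_nicknames nicknames out) := by unfold Spec_assign_unique_nicknames; infer_instance

-- ===== CLAIM (what is proved, stated in full; the proofs are below) =====
def Claim_equal_assign_unique_nicknames : Prop := ∀ (nicknames : List String), Dom_assign_unique_nicknames nicknames → Spec_assign_unique_nicknames nicknames (assign_unique_nicknames nicknames)

-- ===== LEMMAS AND PROOFS =====

-- the formatted element for a name whose prior-occurrence count is c
def pvFmt (x : String) (c : Nat) : String :=
  if c = 0 then x else x ++ "(" ++ PySem.Int.toStr (c : Int) ++ ")"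

-- target value at each index: the element labelled with its prefix count
def pvTarget (l : List String) : List String :=
  (List.range l.length).map (fun j => pvFmt (l.getD j "") ((l.take j).count (l.getD j "")))

-- occurrence positions of `name` in `l`, offset by `s`
def pvOcc : List String → String → Nat → List Nat
  | [], _, _ => []
  | x :: xs, name, s => (if x = name then [s] else []) ++ pvOcc xs name (s + 1)

-- ---- A-side characterization ----

def pvRun (pre rest : List String) : List String :=
  match rest with
  | [] => []
  | x :: xs => pvFmt x (pre.count x) :: pvRun (pre ++ [x]) xs

lemma pvLoop (rest pre acc : List String) (d : PySem.Dict String Int)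
    (hc : ∀ y, d.contains y = (pre.count y != 0))
    (hg : ∀ y, d.getD y 0 = (pre.count y : Int)) :
    (rest.foldl
      (fun (st : PySem.Dict String Int × List String) nickname =>
        if st.1.contains nickname = false then
          (st.1.insert nickname 1, st.2 ++ [nickname])
        else
          (st.1.modify nickname 0 (· + 1),
           st.2 ++ [nickname ++ "(" ++ PySem.Int.toStr (st.1.getD nickname 0) ++ ")"]))
      (d, acc)).2 = acc ++ pvRun pre rest := by
  induction rest generalizing pre acc d with
  | nil => simp [pvRun]
  | cons x xs ih =>
    rw [List.foldl_cons, pvRun]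
    by_cases h0 : pre.count x = 0
    · have hcx : d.contains x = false := by rw [hc]; simp [h0]
      rw [if_pos (by rw [hcx])]
      have := ih (pre ++ [x]) (acc ++ [x]) (d.insert x 1)
        (fun y => by
          rw [PySem.Dict.contains_insert, hc]
          by_cases hy : y = x
          · subst hy; simp [List.count_append]
          · simp [hy, List.count_append, Ne.symm hy])
        (fun y => by
          rw [PySem.Dict.getD_insert]
          by_cases hy : y = x
          · subst hy; simp [List.count_append, h0]
          · simp [hy, hg, List.count_append, Ne.symm hy])
      rw [this, List.append_assoc, List.singleton_append, pvFmt, if_pos h0]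
    · have hcx : d.contains x = true := by rw [hc]; simp [h0]
      rw [if_neg (by rw [hcx]; simp)]
      have := ih (pre ++ [x])
        (acc ++ [x ++ "(" ++ PySem.Int.toStr (d.getD x 0) ++ ")"])
        (d.modify x 0 (· + 1))
        (fun y => by
          rw [PySem.Dict.contains_modify, hc]
          by_cases hy : y = x
          · subst hy; simp [List.count_append]
          · simp [hy, List.count_append, Ne.symm hy])
        (fun y => by
          rw [PySem.Dict.getD_modify]
          by_cases hy : y = x
          · subst hy; rw [hg]; simp [List.count_append]
          · simp [hy, hg, List.count_append, Ne.symm hy])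
      rw [this, List.append_assoc, List.singleton_append, pvFmt, if_neg h0, hg]

lemma pvRun_eq_target_aux (rest pre : List String) :
    pvRun pre rest
      = (List.range rest.length).map
          (fun j => pvFmt (rest.getD j "") ((pre ++ rest.take j).count (rest.getD j ""))) := by
  induction rest generalizing pre with
  | nil => simp [pvRun]
  | cons x xs ih =>
    rw [pvRun, List.length_cons, List.range_succ_eq_map, List.map_cons, List.map_map]
    refine congrArg₂ _ (by simp) ?_
    rw [ih (pre ++ [x])]
    refine List.map_congr_left (fun j _ => ?_)
    simp [List.take_succ_cons, List.count_append]

lemma pvA_eq_target (l : List String) : assign_unique_nicknames l = pvTarget l := by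
  unfold assign_unique_nicknames pvTarget
  rw [pvLoop l [] [] PySem.Dict.empty
      (fun y => by simp [PySem.Dict.contains_empty])
      (fun y => by simp [PySem.Dict.getD_empty])]
  rw [List.nil_append, pvRun_eq_target_aux]
  simp

-- ---- occurrence-list facts ----

lemma pvOcc_link (l : List String) (name : String) (s : Nat) :
    ((PySem.List.enumerate l (s : Int)).filter (fun p => p.2 == name)).map (·.1)
      = (pvOcc l name s).map (Nat.cast : Nat → Int) := by
  induction l generalizing s with
  | nil => simp [pvOcc, PySem.List.enumerate_nil]
  | cons x xs ih =>
    rw [PySem.List.enumerate_cons, pvOcc]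
    by_cases hx : x = name
    · subst hx
      have := ih (s + 1)
      push_cast at this ⊢
      simp [this]
    · have := ih (s + 1)
      push_cast at this ⊢
      simp [hx, this]

lemma pvOcc_spec (l : List String) (name : String) (s k i : Nat)
    (h : (pvOcc l name s)[k]? = some i) :
    s ≤ i ∧ l[i - s]? = some name ∧ (l.take (i - s)).count name = k := by
  induction l generalizing s k i with
  | nil => simp [pvOcc] at h
  | cons x xs ih =>
    rw [pvOcc] at h
    by_cases hx : x = name
    · subst hx
      rw [if_pos rfl, List.singleton_append] at h
      match k with
      | 0 =>
        rw [List.getElem?_cons_zero, Option.some_inj] at h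
        subst h
        refine ⟨le_refl _, ?_, ?_⟩ <;> simp
      | k + 1 =>
        rw [List.getElem?_cons_succ] at h
        obtain ⟨hs, hget, hcnt⟩ := ih (s + 1) k i h
        have hd : i - s = (i - (s + 1)) + 1 := by omega
        refine ⟨by omega, ?_, ?_⟩
        · rw [hd, List.getElem?_cons_succ]; exact hget
        · rw [hd, List.take_succ_cons, List.count_cons_self, hcnt]
    · rw [if_neg hx, List.nil_append] at h
      obtain ⟨hs, hget, hcnt⟩ := ih (s + 1) k i h
      have hd : i - s = (i - (s + 1)) + 1 := by omega
      refine ⟨by omega, ?_, ?_⟩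
      · rw [hd, List.getElem?_cons_succ]; exact hget
      · rw [hd, List.take_succ_cons, List.count_cons_of_ne (fun e => hx e), hcnt]

lemma pvOcc_cover (l : List String) (name : String) (s i : Nat)
    (hi : i < l.length) (hn : l[i] = name) : (s + i) ∈ pvOcc l name s := by
  induction l generalizing s i with
  | nil => simp at hi
  | cons x xs ih =>
    rw [pvOcc]
    match i with
    | 0 => simp at hn; subst hn; simp
    | i + 1 =>
      have := ih (s + 1) i (by simpa using hi) (by simpa using hn)
      refine List.mem_append_right _ ?_
      simpa [Nat.add_assoc, Nat.add_comm 1 i] using this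

-- ---- scatter lemma: writes with correct values covering every index produce the target ----

lemma pvScatter (tgt : List String) (writes : List (Int × String)) (init : List String)
    (hlen : init.length = tgt.length)
    (h1 : ∀ p ∈ writes, ∃ j : Nat, p.1 = (j : Int) ∧ j < tgt.length ∧ p.2 = tgt.getD j "")
    (h2 : ∀ j : Nat, j < tgt.length → init.getD j "" = tgt.getD j "" ∨ (j : Int) ∈ writes.map (·.1)) :
    writes.foldl (fun l p => l.set p.1.toNat p.2) init = tgt := by
  induction writes generalizing init with
  | nil =>
    apply List.ext_getElem hlen
    intro i h₁ h₂
    rcases h2 i h₂ with h | h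
    · rwa [List.getD_eq_getElem _ _ h₁, List.getD_eq_getElem _ _ h₂] at h
    · simp at h
  | cons p rest ih =>
    obtain ⟨j, hj1, hj2, hj3⟩ := h1 p (by simp)
    rw [List.foldl_cons]
    apply ih
    · simpa using hlen
    · exact fun q hq => h1 q (by simp [hq])
    · intro i hi
      by_cases hij : i = j
      · subst hij
        left
        rw [hj1, Int.toNat_natCast]
        rw [List.getD_eq_getElem _ _ (by simp; omega)]
        rw [List.getElem_set_self]
        exact hj3
      · have : (init.set p.1.toNat p.2).getD i "" = init.getD i "" := by
          have hne : p.1.toNat ≠ i := by rw [hj1, Int.toNat_natCast]; omega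
          by_cases hilt : i < init.length
          · rw [List.getD_eq_getElem _ _ (by simpa using hilt),
                List.getD_eq_getElem _ _ hilt, List.getElem_set_ne hne]
          · rw [List.getD_eq_default _ _ (by simpa using Nat.le_of_not_lt hilt),
                List.getD_eq_default _ _ (Nat.le_of_not_lt hilt)]
        rw [this]
        rcases h2 i hi with h | h
        · exact Or.inl h
        · simp only [List.map_cons, List.mem_cons] at h
          rcases h with h | h
          · exfalso; rw [hj1] at h; exact hij (by exact_mod_cast h)
          · exact Or.inr h

lemma pvFoldlFlatMap {α γ β : Type} (L : List α) (g : α → List γ) (h : β → γ → β) (init : β) :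
    (L.flatMap g).foldl h init = L.foldl (fun a x => (g x).foldl h a) init := by
  induction L generalizing init with
  | nil => simp
  | cons x xs ih => simp [List.flatMap_cons, List.foldl_append, ih]

-- ---- B equals the target ----

lemma pvB_eq_target (l : List String) : assign_unique_nicknames_alt l = pvTarget l := by
  unfold assign_unique_nicknames_alt
  set d := (PySem.List.enumerate l).foldl
      (fun (d : PySem.Dict String (List Int)) p => d.modify p.2 [] (· ++ [p.1]))
      PySem.Dict.empty with hd
  have hnodup : d.keys.Nodup := by
    rw [hd]
    exact PySem.Dict.nodup_keys_foldl_modify_key (PySem.List.enumerate l)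
      (fun (p : Int × String) => p.2) []
      (fun _ p v => v ++ [p.1]) PySem.Dict.empty PySem.Dict.nodup_keys_empty
  have hget : ∀ c, d.getD c [] = (pvOcc l c 0).map (Nat.cast : Nat → Int) := by
    intro c
    have h0 := PySem.Dict.getD_foldl_modify_append
      ((PySem.List.enumerate l).map (fun (p : Int × String) => (p.2, p.1))) PySem.Dict.empty c
    rw [List.foldl_map] at h0
    have h1 : d.getD c []
        = List.map (fun x => x.2)
            (List.filter (fun p => p.1 == c) ((PySem.List.enumerate l).map (fun (p : Int × String) => (p.2, p.1)))) := by
      rw [hd]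
      simpa [PySem.Dict.getD_empty] using h0
    rw [h1, List.filter_map, List.map_map]
    have h2 : ((PySem.List.enumerate l).filter
          ((fun (p : String × Int) => p.1 == c) ∘ (fun p => (p.2, p.1))))
        = (PySem.List.enumerate l).filter (fun p => p.2 == c) := by
      exact List.filter_congr (fun p _ => rfl)
    rw [h2]
    have h3 := pvOcc_link l c 0
    simpa using h3
  have hkeys : d.keys = PySem.Set.ofList l := by
    rw [hd, PySem.Dict.keys_foldl_modify_key, PySem.List.map_snd_enumerate]
    rw [PySem.Set.ofList_eq_foldl]
    simp [PySem.Dict.keys_empty, PySem.Set.update]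
  have hitems : d.items
      = (PySem.Set.ofList l).map
          (fun nm => (nm, (pvOcc l nm 0).map (Nat.cast : Nat → Int))) := by
    rw [PySem.Dict.items_eq_map_keys d hnodup [], hkeys]
    exact List.map_congr_left (fun nm _ => by rw [hget])
  -- flatten the double loop into a single list of (index, value) writes
  have hflat :
      d.items.foldl
        (fun out q =>
          (PySem.List.enumerate q.2).foldl
            (fun out r =>
              out.set r.2.toNat
                (if r.1 = 0 then q.1 else q.1 ++ "(" ++ PySem.Int.toStr r.1 ++ ")"))
            out)
        (List.replicate l.length "")
      = (d.items.flatMap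
          (fun q => (PySem.List.enumerate q.2).map
            (fun r => (r.2, if r.1 = 0 then q.1 else q.1 ++ "(" ++ PySem.Int.toStr r.1 ++ ")")))).foldl
          (fun out p => out.set p.1.toNat p.2) (List.replicate l.length "") := by
    rw [pvFoldlFlatMap]
    simp only [List.foldl_map]
  rw [hflat]
  apply pvScatter
  · simp [pvTarget]
  · -- every write hits a valid index with the target value
    intro p hp
    rw [List.mem_flatMap] at hp
    obtain ⟨q, hq, hpq⟩ := hp
    rw [hitems, List.mem_map] at hq
    obtain ⟨nm, _, hqd⟩ := hq
    rw [List.mem_map] at hpq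
    obtain ⟨r, hr, hpr⟩ := hpq
    subst hqd
    rw [PySem.List.mem_enumerate_iff] at hr
    obtain ⟨k, hk, hrk⟩ := hr
    rw [List.length_map] at hk
    have hocc : ((pvOcc l nm 0).map (Nat.cast : Nat → Int))[k] = (((pvOcc l nm 0)[k] : Nat) : Int) := by
      rw [List.getElem_map]
    set j : Nat := (pvOcc l nm 0)[k] with hj
    obtain ⟨-, hget', hcnt⟩ := pvOcc_spec l nm 0 k j (by rw [List.getElem?_eq_getElem hk])
    rw [Nat.sub_zero] at hget' hcnt
    obtain ⟨hjlt, hlj⟩ := List.getElem?_eq_some_iff.mp hget'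
    refine ⟨j, ?_, ?_, ?_⟩
    · rw [← hpr, hrk, hocc]
    · simpa [pvTarget] using hjlt
    · rw [← hpr, hrk]
      have htgt : (pvTarget l).getD j "" = pvFmt nm ((l.take j).count nm) := by
        unfold pvTarget
        rw [List.getD_eq_getElem?_getD, List.getElem?_map,
            List.getElem?_range hjlt]
        simp [hget']
      rw [htgt, hcnt, pvFmt]
      simp only [zero_add]
      by_cases hk0 : k = 0
      · subst hk0; simp
      · rw [if_neg hk0, if_neg (by exact_mod_cast hk0)]
  · -- every index is written
    intro j hjl
    right
    have hjl' : j < l.length := by simpa [pvTarget] using hjl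
    rw [List.map_flatMap]
    rw [List.mem_flatMap]
    refine ⟨(l[j], (pvOcc l (l[j]) 0).map (Nat.cast : Nat → Int)), ?_, ?_⟩
    · rw [hitems, List.mem_map]
      exact ⟨l[j], by rw [PySem.Set.mem_ofList]; exact List.getElem_mem hjl', rfl⟩
    · have hone : (j : Int) ∈ (pvOcc l (l[j]) 0).map (Nat.cast : Nat → Int) := by
        rw [List.mem_map]
        exact ⟨j, by simpa using pvOcc_cover l (l[j]) 0 j hjl' rfl, rfl⟩
      rw [List.map_map]
      have : ((fun (p : Int × String) => p.1) ∘
          (fun r => ((r.2 : Int), if r.1 = 0 then l[j]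
            else l[j] ++ "(" ++ PySem.Int.toStr r.1 ++ ")")))
          = (fun (r : Int × Int) => r.2) := rfl
      rw [this, PySem.List.map_snd_enumerate]
      exact hone

-- ===== VERDICT (by name: the statement is the Claim_ definition above) =====
theorem assign_unique_nicknames_spec : Claim_equal_assign_unique_nicknames := by
  intro l _
  unfold Spec_assign_unique_nicknames
  rw [pvA_eq_target, pvB_eq_target]
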